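-- pv_equiv track=rewrite | github.com/pabachmann/iterative-abcvoting | set_preferences.py | cmp_kelly_strict
-- ===== SOURCE A (Python) =====
-- def cmp_kelly_strict(preference:list[int], A:set, B:set) -> bool:
--     strict = False
--     for a in A:
--         for b in B:
--             comp = preference.index(b) - preference.index(a)
--             if comp < 0:
--                 return False
--             if comp > 0:
--                 strict = True
--     return strict
-- ===== SOURCE B (Python) =====
-- def cmp_kelly_strict(preference: list[int], A: set, B: set) -> bool:
--     # weak dominance with at least one strict pair, via min/max rank reductions
--     if not A or not B:
--         return False
--     posA = [preference.index(a) for a in A]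
--     posB = [preference.index(b) for b in B]
--     return max(posA) <= min(posB) and min(posA) < max(posB)
-- ===== Notes on version B (the rewrite author's own statement) =====
-- stated objective: alternative
-- what changed: Replaced the nested all-pairs scan (repeated preference.index inside a double loop with early exit) by two index-list builds and four min/max reductions: A weakly dominates B iff max rank of A <= min rank of B, with strictness iff min rank of A < max rank of B.
-- outside the precondition, e.g. on cmp_kelly_strict([1, 2], {2, 3}, {1}): A returns False, B raises ValueError
import Mathlib
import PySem

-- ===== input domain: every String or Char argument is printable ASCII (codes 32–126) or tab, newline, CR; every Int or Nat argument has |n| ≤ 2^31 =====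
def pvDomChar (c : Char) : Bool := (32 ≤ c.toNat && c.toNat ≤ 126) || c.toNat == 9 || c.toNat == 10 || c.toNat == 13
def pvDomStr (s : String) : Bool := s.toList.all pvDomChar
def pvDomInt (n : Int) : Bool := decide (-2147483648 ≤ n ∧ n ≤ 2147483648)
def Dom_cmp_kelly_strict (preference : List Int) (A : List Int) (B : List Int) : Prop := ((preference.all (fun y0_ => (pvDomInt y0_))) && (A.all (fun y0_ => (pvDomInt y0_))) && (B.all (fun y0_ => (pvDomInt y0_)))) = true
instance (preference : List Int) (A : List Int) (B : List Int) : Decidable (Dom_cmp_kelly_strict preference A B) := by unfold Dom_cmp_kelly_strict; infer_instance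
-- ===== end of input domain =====

-- B replaces A's nested all-pairs rank comparison by min/max rank reductions over each set (alternative algorithm, same observable result).


-- ===== PORT A =====
-- preference.index x; Pre_ guarantees membership, so the getD 0 default is never taken on admitted inputs
def pvIdx (preference : List Int) (x : Int) : Int := ((PySem.List.index? preference x).getD 0 : Nat)

-- the inner 'for b in B' loop; none = the 'return False' early exit, some s = fall through with strict = s
def cksInner (preference : List Int) (a : Int) (strict : Bool) : List Int → Option Bool
  | [] => some strict
  | b :: bs =>
    let comp := pvIdx preference b - pvIdx preference a
    if comp < 0 then none
    else cksInner preference a (if comp > 0 then true else strict) bs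

-- the outer 'for a in A' loop carrying strict
def cksOuter (preference : List Int) (B : List Int) (strict : Bool) : List Int → Bool
  | [] => strict
  | a :: as' =>
    match cksInner preference a strict B with
    | none => false
    | some s => cksOuter preference B s as'

def cmp_kelly_strict (preference : List Int) (A : List Int) (B : List Int) : Bool :=
  cksOuter preference B false A

-- ===== PORT B =====
def cmp_kelly_strict_alt (preference : List Int) (A : List Int) (B : List Int) : Bool :=
  if A = [] || B = [] then false
  else
    let posA := A.map (pvIdx preference)
    let posB := B.map (pvIdx preference)
    decide ((PySem.List.max? posA (fun x => x)).getD 0 ≤ (PySem.List.min? posB (fun x => x)).getD 0) &&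
    decide ((PySem.List.min? posA (fun x => x)).getD 0 < (PySem.List.max? posB (fun x => x)).getD 0)

-- ===== PRECONDITION & SPEC =====
-- Pre_ excludes inputs with both sets nonempty and some element missing from preference: there the set-iteration
-- order decides whether A hits ValueError or short-circuits to False, and B (which ranks every element) raises.
def Pre_cmp_kelly_strict (preference : List Int) (A : List Int) (B : List Int) : Prop :=
  A = [] ∨ B = [] ∨ ((∀ a ∈ A, a ∈ preference) ∧ (∀ b ∈ B, b ∈ preference))
instance (preference : List Int) (A : List Int) (B : List Int) : Decidable (Pre_cmp_kelly_strict preference A B) := by unfold Pre_cmp_kelly_strict; infer_instance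

def pvWitness_cmp_kelly_strict : List Int × List Int × List Int := ([3, 1, 2], [1], [2, 3])

def Spec_cmp_kelly_strict (preference : List Int) (A : List Int) (B : List Int) (out : Bool) : Prop := out = cmp_kelly_strict_alt preference A B
instance (preference : List Int) (A : List Int) (B : List Int) (out : Bool) : Decidable (Spec_cmp_kelly_strict preference A B out) := by unfold Spec_cmp_kelly_strict; infer_instance

-- ===== CLAIM (what is proved, stated in full; the proofs are below) =====
def Claim_equal_cmp_kelly_strict : Prop := ∀ (preference : List Int) (A : List Int) (B : List Int), Dom_cmp_kelly_strict preference A B → Pre_cmp_kelly_strict preference A B → Spec_cmp_kelly_strict preference A B (cmp_kelly_strict preference A B)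

-- ===== LEMMAS AND PROOFS =====

theorem cksInner_eq (p : List Int) (a : Int) (B : List Int) : ∀ strict,
    cksInner p a strict B =
      if B.any (fun b => pvIdx p b < pvIdx p a) then none
      else some (strict || B.any (fun b => pvIdx p a < pvIdx p b)) := by
  induction B with
  | nil => intro strict; simp [cksInner]
  | cons b bs ih =>
    intro strict
    simp only [cksInner, List.any_cons]
    by_cases hb : pvIdx p b < pvIdx p a
    · simp [hb, show pvIdx p b - pvIdx p a < 0 by omega]
    · have h1 : ¬ pvIdx p b - pvIdx p a < 0 := by omega
      rw [if_neg h1, ih]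
      by_cases h2 : pvIdx p a < pvIdx p b
      · simp [hb, h2]
      · simp [hb, h2]

theorem cksOuter_eq (p : List Int) (B : List Int) (A : List Int) : ∀ strict,
    cksOuter p B strict A =
      (!(A.any (fun a => B.any (fun b => pvIdx p b < pvIdx p a))) &&
        (strict || A.any (fun a => B.any (fun b => pvIdx p a < pvIdx p b)))) := by
  induction A with
  | nil => intro strict; simp [cksOuter]
  | cons a as' ih =>
    intro strict
    simp only [cksOuter, cksInner_eq, List.any_cons]
    by_cases hbad : B.any (fun b => pvIdx p b < pvIdx p a) = true
    · simp [hbad]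
    · simp only [hbad, Bool.false_eq_true, if_false, ih]
      cases strict <;> cases h1 : B.any (fun b => pvIdx p a < pvIdx p b) <;>
        simp

theorem cmp_eq_alt (p : List Int) (A B : List Int) :
    cmp_kelly_strict p A B = cmp_kelly_strict_alt p A B := by
  rcases A with _ | ⟨a0, as'⟩
  · simp [cmp_kelly_strict, cksOuter, cmp_kelly_strict_alt]
  rcases B with _ | ⟨b0, bs⟩
  · simp [cmp_kelly_strict, cmp_kelly_strict_alt, cksOuter_eq]
  set A := a0 :: as' with hAdef
  set B := b0 :: bs with hBdef
  have hA : A ≠ [] := by simp [hAdef]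
  have hB : B ≠ [] := by simp [hBdef]
  have hAm : A.map (pvIdx p) ≠ [] := by simp [hA]
  have hBm : B.map (pvIdx p) ≠ [] := by simp [hB]
  rw [cmp_kelly_strict, cksOuter_eq]
  rw [cmp_kelly_strict_alt, if_neg (by simp [hA, hB])]
  rcases hmA : PySem.List.max? (A.map (pvIdx p)) (fun x => x) with _ | mA
  · exact absurd ((PySem.List.max?_eq_none_iff _ _).mp hmA) hAm
  rcases hnB : PySem.List.min? (B.map (pvIdx p)) (fun x => x) with _ | nB
  · exact absurd ((PySem.List.min?_eq_none_iff _ _).mp hnB) hBm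
  rcases hnA : PySem.List.min? (A.map (pvIdx p)) (fun x => x) with _ | nA
  · exact absurd ((PySem.List.min?_eq_none_iff _ _).mp hnA) hAm
  rcases hmB : PySem.List.max? (B.map (pvIdx p)) (fun x => x) with _ | mB
  · exact absurd ((PySem.List.max?_eq_none_iff _ _).mp hmB) hBm
  simp only [hmA, hnB, hnA, hmB, Option.getD_some]
  rw [Bool.eq_iff_iff]
  simp only [Bool.and_eq_true, Bool.not_eq_true', List.any_eq_false,
    List.any_eq_true, decide_eq_true_eq, Bool.false_or]
  have maxA_mem := PySem.List.max?_mem hmA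
  have maxA_ub := PySem.List.max?_isMax hmA
  have minB_mem := PySem.List.min?_mem hnB
  have minB_lb := PySem.List.min?_isMin hnB
  have minA_mem := PySem.List.min?_mem hnA
  have minA_lb := PySem.List.min?_isMin hnA
  have maxB_mem := PySem.List.max?_mem hmB
  have maxB_ub := PySem.List.max?_isMax hmB
  constructor
  · rintro ⟨hnobad, a1, ha1, b1, hb1, hlt⟩
    constructor
    · obtain ⟨aM, haM, haMv⟩ := List.mem_map.mp maxA_mem
      obtain ⟨bN, hbN, hbNv⟩ := List.mem_map.mp minB_mem
      have hno := hnobad aM haM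
      push Not at hno
      have := hno bN hbN
      omega
    · have h1 := minA_lb _ (List.mem_map.mpr ⟨a1, ha1, rfl⟩)
      have h2 := maxB_ub _ (List.mem_map.mpr ⟨b1, hb1, rfl⟩)
      simp only at h1 h2
      omega
  · rintro ⟨hwk, hst⟩
    constructor
    · intro a ha
      rintro ⟨b, hb, hlt⟩
      have h1 := maxA_ub _ (List.mem_map.mpr ⟨a, ha, rfl⟩)
      have h2 := minB_lb _ (List.mem_map.mpr ⟨b, hb, rfl⟩)
      simp only at h1 h2
      omega
    · obtain ⟨aN, haN, haNv⟩ := List.mem_map.mp minA_mem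
      obtain ⟨bM, hbM, hbMv⟩ := List.mem_map.mp maxB_mem
      exact ⟨aN, haN, bM, hbM, by omega⟩

-- ===== VERDICT (by name: the statement is the Claim_ definition above) =====
theorem cmp_kelly_strict_spec : Claim_equal_cmp_kelly_strict := by
  intro p A B _ _
  unfold Spec_cmp_kelly_strict
  exact cmp_eq_alt p A B
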